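-- pv_equiv track=rewrite | github.com/hasesuns/atcoder | submitted/typical90/6.py | get_next_c_lists
-- ===== SOURCE A (Python) =====
-- from typing import List
--
-- def get_next_c_lists(s: str) -> List[List[int]]:
--     """Sのi文字目以降で最初に文字cが登場するindexのリストnext_c_lists[i][c]を返す
--
--     Args:
--         s (str): [description]
--
--     Returns:
--         List[List[int]]: [description]
--     """
--     len_s = len(s)
--     next_c_lists = [[len_s+1]*26 for _ in range(len_s+1)]
--     for i in reversed(range(len_s)):
--         for j in range(26):
--             if ord(s[i]) - ord("a") == j:
--                 next_c_lists[i][j] = i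
--             else:
--                 next_c_lists[i][j] = next_c_lists[i+1][j]
--
--     return next_c_lists
-- ===== SOURCE B (Python) =====
-- from typing import List
--
-- def get_next_c_lists(s: str) -> List[List[int]]:
--     n = len(s)
--     # Column-major: for each letter c, build its whole next-occurrence column
--     # by a forward sweep that fills the gap up to each occurrence, then transpose.
--     cols = []
--     for c in range(26):
--         ch = chr(ord("a") + c)
--         col = [n + 1] * (n + 1)
--         start = 0
--         for p in range(n):
--             if s[p] == ch:
--                 for i in range(start, p + 1):
--                     col[i] = p
--                 start = p + 1
--         cols.append(col)
--     return [[cols[c][i] for c in range(26)] for i in range(n + 1)]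
-- ===== Notes on version B (the rewrite author's own statement) =====
-- stated objective: alternative
-- what changed: Replaces A's backward row-by-row DP (each row copied cell-by-cell from the row below with a 26-way branch) by a column-major construction: for each of the 26 letters a forward sweep over its occurrence positions fills that letter's whole next-occurrence column by intervals, and the rows are produced by a final transpose.
import Mathlib
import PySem

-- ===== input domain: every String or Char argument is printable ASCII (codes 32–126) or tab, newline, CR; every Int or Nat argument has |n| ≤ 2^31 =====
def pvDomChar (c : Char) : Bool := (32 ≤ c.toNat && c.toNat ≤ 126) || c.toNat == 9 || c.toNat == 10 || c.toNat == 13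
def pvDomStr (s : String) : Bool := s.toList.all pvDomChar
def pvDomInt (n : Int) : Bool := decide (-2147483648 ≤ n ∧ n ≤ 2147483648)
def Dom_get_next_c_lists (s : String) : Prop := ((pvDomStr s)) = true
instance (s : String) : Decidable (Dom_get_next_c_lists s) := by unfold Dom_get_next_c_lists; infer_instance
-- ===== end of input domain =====

-- B builds the table column-major (one forward interval-filling sweep per letter, then a
-- transpose) instead of A's backward row-by-row DP; same cost, different construction.

-- ===== PORT A =====
-- Literal transliteration of A: (len_s+1) rows of 26 sentinels; for i in reversed(range(len_s)):
-- for j in range(26): cell (i,j) := i if ord(s[i])-ord('a') == j else the cell (i+1,j).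
-- All indices are in range (i < len_s+1, j < 26), so getD is exact for Python's indexing here.
def get_next_c_lists (s : String) : List (List Int) :=
  let cs := s.toList
  let lenS := cs.length
  let init : List (List Int) := List.replicate (lenS + 1) (List.replicate 26 ((lenS : Int) + 1))
  (List.range lenS).reverse.foldl (fun table i =>
    (List.range 26).foldl (fun t j =>
      t.set i ((t.getD i []).set j
        (if ((cs.getD i ' ').toNat : Int) - 97 = (j : Int) then (i : Int)
         else (t.getD (i + 1) []).getD j 0))) table) init

-- ===== PORT B =====
-- Transliteration of B (Source B): for each c in range(26), a forward sweep over positions p;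
-- whenever s[p] == chr(97+c), fill col[start..p] with p and set start = p+1; finally
-- transpose the 26 columns into rows.
def get_next_c_lists_alt (s : String) : List (List Int) :=
  let cs := s.toList
  let n := cs.length
  let cols : List (List Int) := (List.range 26).map (fun c =>
    let ch := Char.ofNat (97 + c)
    ((List.range n).foldl (fun st p =>
        if cs.getD p ' ' = ch then
          ((List.range' st.2 (p + 1 - st.2)).foldl (fun col i => col.set i (p : Int)) st.1, p + 1)
        else st) (List.replicate (n + 1) ((n : Int) + 1), 0)).1)
  (List.range (n + 1)).map (fun i => (List.range 26).map (fun c => (cols.getD c []).getD i 0))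

-- ===== PRECONDITION & SPEC =====
def Spec_get_next_c_lists (s : String) (out : List (List Int)) : Prop := out = get_next_c_lists_alt s
instance (s : String) (out : List (List Int)) : Decidable (Spec_get_next_c_lists s out) := by unfold Spec_get_next_c_lists; infer_instance

-- ===== CLAIM (what is proved, stated in full; the proofs are below) =====
def Claim_equal_get_next_c_lists : Prop := ∀ (s : String), Dom_get_next_c_lists s → Spec_get_next_c_lists s (get_next_c_lists s)

-- ===== LEMMAS AND PROOFS =====

-- The common specification: nxt cs c i = the least p with i ≤ p < |cs| and cs[p] = chr(97+c),
-- else |cs|+1; target cs = the full (|cs|+1) × 26 table of these values.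
def findNext (ch : Char) : List Char → Nat → Int → Int
  | [], _, stop => stop
  | a :: t, off, stop => if a = ch then (off : Int) else findNext ch t (off + 1) stop

def nxt (cs : List Char) (c : Nat) (i : Nat) : Int :=
  findNext (Char.ofNat (97 + c)) (cs.drop i) i ((cs.length : Int) + 1)

def target (cs : List Char) : List (List Int) :=
  (List.range (cs.length + 1)).map (fun i => (List.range 26).map (fun c => nxt cs c i))

theorem nxt_ge (cs : List Char) (c i : Nat) (h : cs.length ≤ i) :
    nxt cs c i = (cs.length : Int) + 1 := by
  unfold nxt
  rw [List.drop_eq_nil_of_le h]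
  rfl

theorem nxt_lt (cs : List Char) (c i : Nat) (h : i < cs.length) :
    nxt cs c i = if cs.getD i ' ' = Char.ofNat (97 + c) then (i : Int) else nxt cs c (i + 1) := by
  unfold nxt
  rw [List.drop_eq_getElem_cons h, List.getD_eq_getElem?_getD, List.getElem?_eq_getElem h]
  rfl

theorem char_eq_iff (a : Char) (c : Nat) (h : c < 26) :
    (a = Char.ofNat (97 + c)) ↔ ((a.toNat : Int) - 97 = (c : Int)) := by
  have hv : (97 + c).isValidChar := by unfold Nat.isValidChar; left; omega
  have ht : (Char.ofNat (97 + c)).toNat = 97 + c := by rw [Char.toNat_ofNat, if_pos hv]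
  constructor
  · rintro rfl; rw [ht]; push_cast; ring
  · intro h2
    have : a.toNat = (Char.ofNat (97 + c)).toNat := by omega
    exact Char.ext (UInt32.toNat_inj.mp this)

theorem nxt_none (cs : List Char) (c i : Nat)
    (h : ∀ q, i ≤ q → q < cs.length → cs.getD q ' ' ≠ Char.ofNat (97 + c)) :
    nxt cs c i = (cs.length : Int) + 1 := by
  by_cases hi : cs.length ≤ i
  · exact nxt_ge cs c i hi
  · have hi2 : i < cs.length := by omega
    rw [nxt_lt cs c i hi2, if_neg (h i le_rfl hi2)]
    exact nxt_none cs c (i + 1) (fun q hq => h q (by omega))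
termination_by cs.length - i

theorem nxt_hit (cs : List Char) (c i p : Nat) (hip : i ≤ p) (hp : p < cs.length)
    (hc : cs.getD p ' ' = Char.ofNat (97 + c))
    (h : ∀ q, i ≤ q → q < p → cs.getD q ' ' ≠ Char.ofNat (97 + c)) :
    nxt cs c i = (p : Int) := by
  rcases Nat.eq_or_lt_of_le hip with rfl | hlt
  · rw [nxt_lt cs c i hp, if_pos hc]
  · rw [nxt_lt cs c i (by omega)]
    rw [if_neg (h i le_rfl hlt)]
    exact nxt_hit cs c (i + 1) p (by omega) hp hc (fun q hq => h q (by omega))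
termination_by p - i

-- small getD helpers ------------------------------------------------------

theorem getD_replicate {α : Type} [Inhabited α] (n : Nat) (a : α) (i : Nat) (d : α) :
    (List.replicate n a).getD i d = if i < n then a else d := by
  rw [List.getD_eq_getElem?_getD, List.getElem?_replicate]
  split <;> rfl

theorem getD_map_range {α : Type} [Inhabited α] (f : Nat → α) (m k : Nat) (d : α) (h : k < m) :
    ((List.range m).map f).getD k d = f k := by
  rw [List.getD_eq_getElem?_getD, List.getElem?_map, List.getElem?_range h]
  rfl

theorem pv_getD_mid {α : Type} [Inhabited α] (pre : List α) (x : α) (suf : List α) (d : α) :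
    (pre ++ x :: suf).getD pre.length d = x := by
  induction pre with
  | nil => rfl
  | cons a l ih => simp

theorem pv_getD_mid_succ {α : Type} [Inhabited α] (pre : List α) (x y : α) (suf : List α) (d : α) :
    (pre ++ x :: y :: suf).getD (pre.length + 1) d = y := by
  induction pre with
  | nil => rfl
  | cons a l ih =>
      simp only [List.cons_append, List.length_cons, List.getD_cons_succ]
      exact ih

theorem pv_set_mid {α : Type} (pre : List α) (x y : α) (suf : List α) :
    (pre ++ x :: suf).set pre.length y = pre ++ y :: suf := by
  induction pre with
  | nil => rfl
  | cons a l ih => simp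

-- A-side lemmas -----------------------------------------------------------

-- The inner 26-fold only touches row i; with the row below fixed it rewrites row i cell-by-cell.
theorem stepA_local (i : Nat) (F : Nat → Int → Int) (js : List Nat) :
    ∀ (pre : List (List Int)), pre.length = i → ∀ (rowi nxtrow : List Int) (rest : List (List Int)),
    js.foldl (fun t j =>
        t.set i ((t.getD i []).set j (F j ((t.getD (i + 1) []).getD j 0))))
      (pre ++ rowi :: nxtrow :: rest)
    = pre ++ (js.foldl (fun r j => r.set j (F j (nxtrow.getD j 0))) rowi) :: nxtrow :: rest := by
  induction js with
  | nil => intro pre hpre rowi nxtrow rest; rfl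
  | cons j t ih =>
      intro pre hpre rowi nxtrow rest
      simp only [List.foldl_cons]
      rw [← hpre, pv_getD_mid, pv_getD_mid_succ, pv_set_mid, hpre]
      exact ih pre hpre _ nxtrow rest

-- Overwriting positions 0..m-1 of a list by v yields the map of v plus the untouched tail.
theorem foldl_set_range (v : Nat → Int) :
    ∀ (m : Nat) (r : List Int), m ≤ r.length →
      (List.range m).foldl (fun r j => r.set j (v j)) r = (List.range m).map v ++ r.drop m := by
  intro m
  induction m with
  | zero => intro r _; simp
  | succ m ih =>
      intro r hm
      have hmr : m < r.length := by omega
      rw [List.range_succ, List.foldl_append, List.foldl_cons, List.foldl_nil,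
        ih r (by omega), List.drop_eq_getElem_cons hmr, List.map_append]
      have hlen : ((List.range m).map v).length = m := by simp
      have hset := pv_set_mid ((List.range m).map v) (r[m]) (v m) (r.drop (m + 1))
      rw [hlen] at hset
      rw [hset]
      simp

theorem range_reverse_cons (m : Nat) : (List.range (m + 1)).reverse = m :: (List.range m).reverse := by
  rw [List.range_succ, List.reverse_append]
  simp

-- A's backward loop, from the point where rows m..n already hold their final values.
theorem A_loop (cs : List Char) :
    ∀ (m : Nat), m ≤ cs.length →
      (List.range m).reverse.foldl (fun table i =>
          (List.range 26).foldl (fun t j =>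
            t.set i ((t.getD i []).set j
              (if ((cs.getD i ' ').toNat : Int) - 97 = (j : Int) then (i : Int)
               else (t.getD (i + 1) []).getD j 0))) table)
        (List.replicate m (List.replicate 26 ((cs.length : Int) + 1)) ++
          (List.range' m (cs.length + 1 - m)).map (fun i => (List.range 26).map (fun c => nxt cs c i)))
      = target cs := by
  intro m
  induction m with
  | zero =>
      intro _
      simp [target, List.range_eq_range']
  | succ m ih =>
      intro hm
      have hmn : m < cs.length := by omega
      rw [range_reverse_cons, List.foldl_cons]
      have hsplit : cs.length + 1 - (m + 1) = (cs.length - m - 1) + 1 := by omega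
      have hrange : List.range' (m + 1) (cs.length + 1 - (m + 1)) =
          (m + 1) :: List.range' (m + 2) (cs.length - m - 1) := by
        rw [hsplit, List.range'_succ]
      have hrep : List.replicate (m + 1) (List.replicate 26 ((cs.length : Int) + 1)) =
          List.replicate m (List.replicate 26 ((cs.length : Int) + 1)) ++
            [List.replicate 26 ((cs.length : Int) + 1)] := by
        rw [List.replicate_succ']
      rw [hrange, hrep]
      simp only [List.map_cons, List.append_assoc, List.singleton_append]
      rw [stepA_local m (fun j x => if ((cs.getD m ' ').toNat : Int) - 97 = (j : Int) then (m : Int) else x)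
        (List.range 26) _ (by simp) _ _ _]
      -- the rewritten row m is exactly the spec row m
      have hrow : (List.range 26).foldl
          (fun r j => r.set j (if ((cs.getD m ' ').toNat : Int) - 97 = (j : Int) then (m : Int)
            else ((List.range 26).map (fun c => nxt cs c (m + 1))).getD j 0))
          (List.replicate 26 ((cs.length : Int) + 1))
          = (List.range 26).map (fun c => nxt cs c m) := by
        rw [foldl_set_range _ 26 _ (by simp)]
        simp only [List.drop_eq_nil_of_le (by simp : (List.replicate 26 ((cs.length : Int) + 1)).length ≤ 26), List.append_nil]
        apply List.map_congr_left
        intro j hj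
        rw [List.mem_range] at hj
        rw [getD_map_range _ 26 j 0 hj, nxt_lt cs j m hmn]
        by_cases hc : cs.getD m ' ' = Char.ofNat (97 + j)
        · rw [if_pos hc, if_pos ((char_eq_iff _ j hj).mp hc)]
        · rw [if_neg hc, if_neg (fun h => hc ((char_eq_iff _ j hj).mpr h))]
      rw [hrow]
      have h2 : List.range' m (cs.length + 1 - m) =
          m :: (m + 1) :: List.range' (m + 2) (cs.length - m - 1) := by
        rw [show cs.length + 1 - m = ((cs.length - m - 1) + 1) + 1 by omega,
          List.range'_succ, List.range'_succ]
      have hih := ih (by omega)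
      rw [h2] at hih
      simpa using hih

-- B-side lemmas -----------------------------------------------------------

theorem foldl_set_length (x : Int) (l : List Nat) :
    ∀ (col : List Int), (l.foldl (fun col i => col.set i x) col).length = col.length := by
  induction l with
  | nil => intro col; rfl
  | cons a t ih => intro col; rw [List.foldl_cons, ih]; simp

theorem foldl_set_getD (x : Int) (l : List Nat) :
    ∀ (col : List Int) (k : Nat),
      (l.foldl (fun col i => col.set i x) col).getD k 0 =
        if k ∈ l ∧ k < col.length then x else col.getD k 0 := by
  induction l with
  | nil => intro col k; simp
  | cons a t ih =>
      intro col k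
      rw [List.foldl_cons, ih]
      simp only [List.length_set, List.mem_cons]
      by_cases hk : k ∈ t ∧ k < col.length
      · rw [if_pos hk, if_pos ⟨Or.inr hk.1, hk.2⟩]
      · rw [if_neg hk]
        rw [List.getD_eq_getElem?_getD, List.getD_eq_getElem?_getD, List.getElem?_set]
        by_cases hak : a = k
        · subst hak
          by_cases hl : a < col.length
          · simp [hl]
          · simp [hl]
        · simp only [if_neg hak]
          have : ¬ ((k = a ∨ k ∈ t) ∧ k < col.length) := by
            rintro ⟨h1 | h2, h3⟩
            · exact hak h1.symm
            · exact hk ⟨h2, h3⟩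
          rw [if_neg this]

-- Invariant of B's forward sweep for one letter c.
def BInv (cs : List Char) (c : Nat) (m : Nat) (st : List Int × Nat) : Prop :=
  st.1.length = cs.length + 1 ∧ st.2 ≤ m ∧
  (∀ i, i < st.2 → st.1.getD i 0 = nxt cs c i) ∧
  (∀ i, st.2 ≤ i → i < cs.length + 1 → st.1.getD i 0 = (cs.length : Int) + 1) ∧
  (∀ q, st.2 ≤ q → q < m → cs.getD q ' ' ≠ Char.ofNat (97 + c))

theorem BInv_step (cs : List Char) (c : Nat) (m : Nat) (hm : m < cs.length)
    (st : List Int × Nat) (h : BInv cs c m st) :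
    BInv cs c (m + 1)
      (if cs.getD m ' ' = Char.ofNat (97 + c) then
        ((List.range' st.2 (m + 1 - st.2)).foldl (fun col i => col.set i (m : Int)) st.1, m + 1)
      else st) := by
  obtain ⟨hlen, hsm, hdone, hrest, hnone⟩ := h
  by_cases hc : cs.getD m ' ' = Char.ofNat (97 + c)
  · rw [if_pos hc]
    have hmem : ∀ k, k ∈ List.range' st.2 (m + 1 - st.2) ↔ st.2 ≤ k ∧ k < m + 1 := by
      intro k
      rw [List.mem_range'_1]
      omega
    refine ⟨by rw [foldl_set_length]; exact hlen, by omega, ?_, ?_,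
      by intro q hq1 hq2; omega⟩
    · intro i hi
      rw [foldl_set_getD]
      by_cases his : i < st.2
      · have : ¬ (i ∈ List.range' st.2 (m + 1 - st.2) ∧ i < st.1.length) := by
          rintro ⟨h1, _⟩; rw [hmem] at h1; omega
        rw [if_neg this]
        exact hdone i his
      · have h1 : i ∈ List.range' st.2 (m + 1 - st.2) := by rw [hmem]; omega
        rw [if_pos ⟨h1, by omega⟩]
        exact (nxt_hit cs c i m (by omega) hm hc
          (fun q hq1 hq2 => hnone q (by omega) hq2)).symm
    · intro i hi1 hi2
      have : ¬ (i ∈ List.range' st.2 (m + 1 - st.2) ∧ i < st.1.length) := by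
        rintro ⟨h1, _⟩; rw [hmem] at h1; omega
      rw [foldl_set_getD, if_neg this]
      exact hrest i (by omega) hi2
  · rw [if_neg hc]
    refine ⟨hlen, by omega, hdone, hrest, ?_⟩
    intro q hq1 hq2
    by_cases hqm : q = m
    · subst hqm; exact hc
    · exact hnone q hq1 (by omega)

theorem BInv_loop (cs : List Char) (c : Nat) :
    ∀ (m : Nat), m ≤ cs.length →
      BInv cs c m ((List.range m).foldl (fun st p =>
        if cs.getD p ' ' = Char.ofNat (97 + c) then
          ((List.range' st.2 (p + 1 - st.2)).foldl (fun col i => col.set i (p : Int)) st.1, p + 1)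
        else st) (List.replicate (cs.length + 1) ((cs.length : Int) + 1), 0)) := by
  intro m
  induction m with
  | zero =>
      intro _
      simp only [List.range_zero, List.foldl_nil]
      refine ⟨by simp, le_rfl, by intro i hi; omega, ?_, by intro q hq1 hq2; omega⟩
      intro i _ hi
      rw [getD_replicate, if_pos hi]
  | succ m ih =>
      intro hm
      rw [List.range_succ, List.foldl_append, List.foldl_cons, List.foldl_nil]
      exact BInv_step cs c m (by omega) _ (ih (by omega))

theorem BInv_final (cs : List Char) (c : Nat) (st : List Int × Nat)
    (h : BInv cs c cs.length st) (i : Nat) (hi : i < cs.length + 1) :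
    st.1.getD i 0 = nxt cs c i := by
  obtain ⟨hlen, hsm, hdone, hrest, hnone⟩ := h
  by_cases his : i < st.2
  · exact hdone i his
  · rw [hrest i (by omega) hi,
      nxt_none cs c i (fun q hq1 hq2 => hnone q (by omega) hq2)]

theorem B_col (cs : List Char) (c : Nat) (i : Nat) (hi : i < cs.length + 1) :
    (((List.range cs.length).foldl (fun st p =>
        if cs.getD p ' ' = Char.ofNat (97 + c) then
          ((List.range' st.2 (p + 1 - st.2)).foldl (fun col i => col.set i (p : Int)) st.1, p + 1)
        else st) (List.replicate (cs.length + 1) ((cs.length : Int) + 1), 0)).1).getD i 0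
      = nxt cs c i :=
  BInv_final cs c _ (BInv_loop cs c cs.length le_rfl) i hi

-- main proofs -------------------------------------------------------------

theorem A_eq_target (s : String) : get_next_c_lists s = target s.toList := by
  unfold get_next_c_lists
  simp only []
  have hrep : List.replicate (s.toList.length + 1) (List.replicate 26 ((s.toList.length : Int) + 1)) =
      List.replicate s.toList.length (List.replicate 26 ((s.toList.length : Int) + 1)) ++
        (List.range' s.toList.length (s.toList.length + 1 - s.toList.length)).map
          (fun i => (List.range 26).map (fun c => nxt s.toList c i)) := by
    rw [show s.toList.length + 1 - s.toList.length = 1 by omega]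
    rw [List.replicate_succ']
    congr 1
    simp only [List.range'_one, List.map_cons, List.map_nil]
    congr 1
    symm
    rw [List.eq_replicate_iff]
    refine ⟨by simp, ?_⟩
    intro b hb
    simp only [List.mem_map, List.mem_range] at hb
    obtain ⟨c, _, rfl⟩ := hb
    exact nxt_ge s.toList c s.toList.length le_rfl
  rw [hrep]
  exact A_loop s.toList s.toList.length le_rfl

theorem B_eq_target (s : String) : get_next_c_lists_alt s = target s.toList := by
  unfold get_next_c_lists_alt target
  simp only []
  apply List.map_congr_left
  intro i hi
  rw [List.mem_range] at hi
  apply List.map_congr_left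
  intro c hc
  rw [List.mem_range] at hc
  rw [getD_map_range _ 26 c [] hc]
  exact B_col s.toList c i hi

-- ===== VERDICT (by name: the statement is the Claim_ definition above) =====
theorem get_next_c_lists_spec : Claim_equal_get_next_c_lists := by
  intro s _
  show get_next_c_lists s = get_next_c_lists_alt s
  rw [A_eq_target, B_eq_target]
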